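-- pv_equiv track=rewrite | github.com/Godsmith/ProjectEuler | pe58.py | add_2_to_diameter_of_spiral_square
-- ===== SOURCE A (Python) =====
-- def add_2_to_diameter_of_spiral_square(square):
--     d = len(square)
--     n = d ** 2
--     new_first_row_start = n+d
--     new_first_row = list(range(new_first_row_start + d + 2, new_first_row_start, -1))
--     new_last_row_end = (d + 2) ** 2
--     new_last_row = list(reversed(range(new_last_row_end, new_last_row_end - d - 2, -1)))
--     first_column = range(new_first_row[0] + 1, new_last_row[0])
--     last_column = range(new_first_row[-1] - 1, new_first_row[-1] - d - 1, -1)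
--
--     new_square = [new_first_row]
--     for first, last, row in zip(first_column, last_column, square):
--         new_square.append([first] + row + [last])
--     new_square.append(new_last_row)
--     return new_square
-- ===== SOURCE B (Python) =====
-- def add_2_to_diameter_of_spiral_square(square):
--     # Allocate a (d+2)x(d+2) grid, copy the inner square, then walk the ring
--     # in spiral order (up the right column, left along the top, down the left
--     # column, right along the bottom) assigning consecutive values n+1..(d+2)**2.
--     d = len(square)
--     n = d * d
--     grid = [[0] * (d + 2)] + [[0] + list(row) + [0] for row in square] + [[0] * (d + 2)]
--     v = n
--     for r in range(d, 0, -1):        # up the right column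
--         v += 1
--         grid[r][-1] = v
--     for c in range(d + 1, -1, -1):   # left across the top row
--         v += 1
--         grid[0][c] = v
--     for r in range(1, d + 2):        # down the left column
--         v += 1
--         grid[r][0] = v
--     for c in range(1, d + 2):        # right across the bottom row
--         v += 1
--         grid[d + 1][c] = v
--     return grid
-- ===== Notes on version B (the rewrite author's own statement) =====
-- stated objective: alternative
-- what changed: A computes four arithmetic ranges and zips them with the rows; B allocates a (d+2)x(d+2) grid, copies the inner square, and fills the ring by walking the perimeter in spiral order with consecutive values n+1..(d+2)^2.
import Mathlib
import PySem

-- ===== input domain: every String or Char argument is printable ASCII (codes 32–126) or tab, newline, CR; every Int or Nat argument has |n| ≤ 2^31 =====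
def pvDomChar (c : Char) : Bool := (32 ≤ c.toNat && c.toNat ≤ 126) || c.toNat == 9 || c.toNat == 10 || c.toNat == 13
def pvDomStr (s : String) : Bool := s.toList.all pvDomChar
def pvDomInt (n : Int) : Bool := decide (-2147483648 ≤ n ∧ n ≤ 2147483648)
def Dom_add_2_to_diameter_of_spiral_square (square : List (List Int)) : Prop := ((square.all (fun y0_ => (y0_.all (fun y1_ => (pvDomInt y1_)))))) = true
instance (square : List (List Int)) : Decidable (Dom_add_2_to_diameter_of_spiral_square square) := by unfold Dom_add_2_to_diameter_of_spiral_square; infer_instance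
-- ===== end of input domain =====

-- B replaces A's four arithmetic border ranges by allocating a (d+2)x(d+2) grid and
-- walking its perimeter in spiral order (alternative decomposition, same cost).

-- ===== PORT A =====
-- A: builds the four border ranges arithmetically and zips them with the rows.
-- new_first_row / new_last_row always have length d+2 ≥ 2, so Python's [0]/[-1]
-- indexing is total; it is ported as PySem.List.pyGetD at indices 0 and -1.
def add_2_to_diameter_of_spiral_square (square : List (List Int)) : List (List Int) :=
  let d : Int := (square.length : Int)
  let n : Int := d ^ 2
  let newFirstRowStart : Int := n + d
  let newFirstRow : List Int := PySem.List.pyRange (newFirstRowStart + d + 2) newFirstRowStart (-1)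
  let newLastRowEnd : Int := (d + 2) ^ 2
  let newLastRow : List Int := (PySem.List.pyRange newLastRowEnd (newLastRowEnd - d - 2) (-1)).reverse
  let firstColumn : List Int :=
    PySem.List.pyRange (PySem.List.pyGetD newFirstRow 0 0 + 1) (PySem.List.pyGetD newLastRow 0 0) 1
  let lastColumn : List Int :=
    PySem.List.pyRange (PySem.List.pyGetD newFirstRow (-1) 0 - 1) (PySem.List.pyGetD newFirstRow (-1) 0 - d - 1) (-1)
  let newSquare : List (List Int) :=
    (firstColumn.zip (lastColumn.zip square)).foldl
      (fun acc t => acc ++ [[t.1] ++ t.2.2 ++ [t.2.1]]) [newFirstRow]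
  newSquare ++ [newLastRow]

-- ===== PORT B =====
-- row[-1] = v : rows here always have length ≥ 2, so Python's [-1] is the last element
def pvSetLast (row : List Int) (v : Int) : List Int := row.set (row.length - 1) v
-- grid[r][c] = v
def pvSetCell (g : List (List Int)) (r c : Nat) (v : Int) : List (List Int) :=
  g.set r ((g.getD r []).set c v)
-- grid[r][-1] = v
def pvSetCellLast (g : List (List Int)) (r : Nat) (v : Int) : List (List Int) :=
  g.set r (pvSetLast (g.getD r []) v)

def add_2_to_diameter_of_spiral_square_alt (square : List (List Int)) : List (List Int) :=
  let d : Nat := square.length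
  let n : Int := (d : Int) * (d : Int)
  let grid0 : List (List Int) :=
    [List.replicate (d + 2) (0 : Int)]
      ++ square.map (fun row => [0] ++ row ++ [0])
      ++ [List.replicate (d + 2) (0 : Int)]
  -- up the right column
  let s1 := (PySem.List.pyRange (d : Int) 0 (-1)).foldl
      (fun (s : List (List Int) × Int) r => (pvSetCellLast s.1 r.toNat (s.2 + 1), s.2 + 1))
      (grid0, n)
  -- left across the top row
  let s2 := (PySem.List.pyRange ((d : Int) + 1) (-1) (-1)).foldl
      (fun (s : List (List Int) × Int) c => (pvSetCell s.1 0 c.toNat (s.2 + 1), s.2 + 1)) s1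
  -- down the left column
  let s3 := (PySem.List.pyRange 1 ((d : Int) + 2) 1).foldl
      (fun (s : List (List Int) × Int) r => (pvSetCell s.1 r.toNat 0 (s.2 + 1), s.2 + 1)) s2
  -- right across the bottom row
  let s4 := (PySem.List.pyRange 1 ((d : Int) + 2) 1).foldl
      (fun (s : List (List Int) × Int) c => (pvSetCell s.1 (d + 1) c.toNat (s.2 + 1), s.2 + 1)) s3
  s4.1

-- ===== PRECONDITION & SPEC =====
def Spec_add_2_to_diameter_of_spiral_square (square : List (List Int)) (out : List (List Int)) : Prop := out = add_2_to_diameter_of_spiral_square_alt square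
instance (square : List (List Int)) (out : List (List Int)) : Decidable (Spec_add_2_to_diameter_of_spiral_square square out) := by unfold Spec_add_2_to_diameter_of_spiral_square; infer_instance

-- ===== CLAIM (what is proved, stated in full; the proofs are below) =====
def Claim_equal_add_2_to_diameter_of_spiral_square : Prop := ∀ (square : List (List Int)), Dom_add_2_to_diameter_of_spiral_square square → Spec_add_2_to_diameter_of_spiral_square square (add_2_to_diameter_of_spiral_square square)


-- ===== LEMMAS AND PROOFS =====

-- The common closed form both ports are shown to produce.
def tgtInner : List (List Int) → Int → Int → List (List Int)
  | [], _, _ => []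
  | r :: rs, f, l => (f :: (r ++ [l])) :: tgtInner rs (f + 1) (l - 1)
def ringLast : List (List Int) → Int → List (List Int)
  | [], _ => []
  | r :: rs, l => ((0 : Int) :: (r ++ [l])) :: ringLast rs (l - 1)

def tgtTop (L : Nat) (n : Int) : List Int :=
  (List.range (L + 2)).map (fun (k : Nat) => n + 2 * (L : Int) + 2 - (k : Int))
def tgtBot (L : Nat) (n : Int) : List Int :=
  (List.range (L + 2)).map (fun (k : Nat) => n + 3 * (L : Int) + 3 + (k : Int))
def tgt (square : List (List Int)) : List (List Int) :=
  tgtTop square.length ((square.length : Int) * (square.length : Int))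
    :: tgtInner square ((square.length : Int) * (square.length : Int) + 2 * (square.length : Int) + 3)
         ((square.length : Int) * (square.length : Int) + (square.length : Int))
    ++ [tgtBot square.length ((square.length : Int) * (square.length : Int))]


theorem getD_last_map_range (f : Nat → Int) (m : Nat) (d : Int) :
    PySem.List.pyGetD ((List.range (m+2)).map f) (-1) d = f (m+1) := by
  simp [PySem.List.pyGetD, PySem.List.pyGet?, PySem.List.pyIdx?]
theorem getD0_map_range (f : Nat → Int) (m : Nat) (d : Int) :
    PySem.List.pyGetD ((List.range (m+2)).map f) 0 d = f 0 := by
  rw [PySem.List.pyGetD_eq_getElem _ _ (by omega) (by simp; omega)]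
  simp
theorem countdown_map (c : Int) (m : Nat) :
    PySem.List.pyRange c (c - m) (-1) = (List.range m).map (fun k : Nat => c - (k:Int)) := by
  have h : (c - (c - (m:Int))).toNat = m := by omega
  rw [PySem.List.pyRange_neg_one, h]
theorem foldl_snoc_map {γ β : Type} (l : List γ) (f : γ → β) :
    ∀ (init : List β), l.foldl (fun acc x => acc ++ [f x]) init = init ++ l.map f := by
  induction l with
  | nil => simp
  | cons x xs ih => intro init; simp [ih]
theorem zip_ranges_map (square : List (List Int)) : ∀ (a b : Int),
    ((PySem.List.pyRange a (a + square.length) 1).zip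
        ((PySem.List.pyRange b (b - square.length) (-1)).zip square)).map
      (fun t => [t.1] ++ t.2.2 ++ [t.2.1]) = tgtInner square a b := by
  induction square with
  | nil => intro a b; simp [tgtInner]
  | cons r rs ih =>
    intro a b
    rw [PySem.List.pyRange_one_cons (by simp only [List.length_cons]; push_cast; omega : a < a + ((r :: rs).length : Int)),
        PySem.List.pyRange_neg_one_cons (by simp only [List.length_cons]; push_cast; omega : b - ((r :: rs).length : Int) < b)]
    simp only [List.length_cons, List.zip_cons_cons, List.map_cons, tgtInner]
    congr 1
    have h1 : a + ((rs.length : Int) + 1) = (a + 1) + (rs.length : Int) := by ring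
    have h2 : b - ((rs.length : Int) + 1) = (b - 1) - (rs.length : Int) := by ring
    push_cast
    rw [h1, h2]
    exact ih (a + 1) (b - 1)
theorem pyRange_neg_one_snoc (a b : Int) (h : b < a) :
    PySem.List.pyRange a b (-1) = PySem.List.pyRange a (b + 1) (-1) ++ [b + 1] := by
  rw [PySem.List.pyRange_neg_one_eq_reverse, PySem.List.pyRange_neg_one_eq_reverse,
    PySem.List.pyRange_one_cons (by omega : b + 1 < a + 1)]
  simp
theorem set_at_len {α : Type} (xs ys : List α) (a b : α) :
    (xs ++ a :: ys).set xs.length b = xs ++ b :: ys := by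
  simp [List.set_append_right, Nat.sub_self]
theorem getD_at_len {α : Type} (xs ys : List α) (a dflt : α) :
    (xs ++ a :: ys).getD xs.length dflt = a := by
  simp [List.getD_eq_getElem?_getD, List.getElem?_append_right]
theorem set_mid {α : Type} (x a b : α) (xs ys : List α) :
    (x :: (xs ++ a :: ys)).set (xs.length + 1) b = x :: (xs ++ b :: ys) := by
  simp [List.set_cons_succ, set_at_len]
theorem getD_mid {α : Type} (x a : α) (xs ys : List α) (dflt : α) :
    (x :: (xs ++ a :: ys)).getD (xs.length + 1) dflt = a := by
  simp [List.getD_eq_getElem?_getD, List.getElem?_append_right]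
theorem getD_mid' {α : Type} (x a : α) (xs ys : List α) (dflt : α) (j : Nat) (h : xs.length = j) :
    (x :: (xs ++ a :: ys)).getD (j + 1) dflt = a := by subst h; exact getD_mid x a xs ys dflt
theorem set_mid' {α : Type} (x a b : α) (xs ys : List α) (j : Nat) (h : xs.length = j) :
    (x :: (xs ++ a :: ys)).set (j + 1) b = x :: (xs ++ b :: ys) := by subst h; exact set_mid x a b xs ys
theorem setLast_pad (c : List Int) (v : Int) :
    pvSetLast ((0 : Int) :: (c ++ [0])) v = (0 : Int) :: (c ++ [v]) := by
  simp [pvSetLast, List.set_cons_succ, List.set_append_right]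
theorem length_tgtInner (xs : List (List Int)) : ∀ f l, (tgtInner xs f l).length = xs.length := by
  induction xs with
  | nil => intro f l; rfl
  | cons r rs ih => intro f l; simp [tgtInner, ih]
theorem tgtInner_snoc (xs : List (List Int)) (a : List Int) : ∀ (f l : Int),
    tgtInner (xs ++ [a]) f l
      = tgtInner xs f l ++ [(f + xs.length) :: (a ++ [l - xs.length])] := by
  induction xs with
  | nil => intro f l; simp [tgtInner]
  | cons r rs ih =>
    intro f l
    simp only [List.cons_append, tgtInner, ih, List.length_cons]
    push_cast
    ring_nf

theorem s1_inv (square : List (List Int)) (n : Int) : ∀ m, m ≤ square.length →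
    (PySem.List.pyRange (square.length : Int) ((square.length : Int) - (m : Int)) (-1)).foldl
      (fun (s : List (List Int) × Int) r => (pvSetCellLast s.1 r.toNat (s.2 + 1), s.2 + 1))
      ([List.replicate (square.length + 2) (0 : Int)]
        ++ square.map (fun row => [0] ++ row ++ [0])
        ++ [List.replicate (square.length + 2) (0 : Int)], n)
    = (List.replicate (square.length + 2) (0 : Int)
        :: (((square.take (square.length - m)).map (fun row => [0] ++ row ++ [0]))
            ++ (ringLast (square.drop (square.length - m)) (n + m)
                ++ [List.replicate (square.length + 2) (0 : Int)])), n + m) := by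
  intro m
  induction m with
  | zero =>
    intro _
    rw [show ((square.length : Int) - ((0:Nat) : Int)) = (square.length : Int) from by push_cast; ring,
      PySem.List.pyRange_neg_one_eq_nil (by omega)]
    simp [ringLast]
  | succ m ih =>
    intro hm
    have ih' := ih (by omega)
    set k := square.length - (m + 1) with hk
    have hLm : square.length - m = k + 1 := by omega
    rw [hLm] at ih'
    rw [show ((square.length : Int) - ((m+1 : Nat) : Int)) = ((square.length : Int) - (m:Int) - 1) from by push_cast; ring,
      pyRange_neg_one_snoc _ _ (by push_cast; omega),
      show ((square.length : Int) - (m:Int) - 1 + 1) = ((square.length : Int) - (m:Int)) from by ring,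
      List.foldl_append, ih']
    simp only [List.foldl_cons, List.foldl_nil]
    have hlt : k < square.length := by omega
    have htake : square.take (k+1) = square.take k ++ [square[k]] := by
      rw [List.take_succ]; simp [List.getElem?_eq_getElem hlt]
    have hdrop : square.drop k = square[k] :: square.drop (k+1) := (List.getElem_cons_drop hlt).symm
    have hnat : ((square.length : Int) - (m:Int)).toNat = k + 1 := by omega
    rw [htake, List.map_append]
    simp only [List.map_cons, List.map_nil, List.append_assoc, List.cons_append, List.nil_append]
    unfold pvSetCellLast
    rw [hnat]
    rw [getD_mid' _ _ _ _ _ k (by simp; omega), setLast_pad,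
        set_mid' _ _ _ _ _ k (by simp; omega)]
    rw [hdrop]
    simp only [ringLast]
    rw [show (n + ((m+1:Nat):Int) - 1) = n + (m:Int) from by push_cast; ring,
        show (n + ((m+1:Nat):Int)) = n + (m:Int) + 1 from by push_cast; ring]
    simp

theorem fold_head (l : List Int) : ∀ (row : List Int) (rest : List (List Int)) (v : Int),
    l.foldl (fun (s : List (List Int) × Int) c => (pvSetCell s.1 0 c.toNat (s.2 + 1), s.2 + 1)) (row :: rest, v)
    = ((l.foldl (fun (s : List Int × Int) c => (s.1.set c.toNat (s.2 + 1), s.2 + 1)) (row, v)).1 :: rest,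
       (l.foldl (fun (s : List Int × Int) c => (s.1.set c.toNat (s.2 + 1), s.2 + 1)) (row, v)).2) := by
  induction l with
  | nil => intro row rest v; simp
  | cons c cs ih =>
    intro row rest v
    simp only [List.foldl_cons, pvSetCell, List.getD_cons_zero, List.set_cons_zero]
    exact ih (row.set c.toNat (v + 1)) rest (v + 1)

theorem row_desc (L : Nat) (v0 : Int) : ∀ m, m ≤ L + 2 →
    (PySem.List.pyRange ((L:Int) + 1) ((L:Int) + 1 - (m:Int)) (-1)).foldl
      (fun (s : List Int × Int) c => (s.1.set c.toNat (s.2 + 1), s.2 + 1)) (List.replicate (L + 2) (0:Int), v0)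
    = (List.replicate (L + 2 - m) (0:Int) ++ (List.range m).map (fun (j : Nat) => v0 + (m:Int) - (j:Int)), v0 + m) := by
  intro m
  induction m with
  | zero =>
    intro _
    rw [show ((L:Int) + 1 - ((0:Nat):Int)) = (L:Int) + 1 from by push_cast; ring,
      PySem.List.pyRange_neg_one_eq_nil (by omega)]
    simp
  | succ m ih =>
    intro hm
    have ih' := ih (by omega)
    rw [show ((L:Int) + 1 - ((m+1:Nat):Int)) = ((L:Int) + 1 - (m:Int) - 1) from by push_cast; ring,
      pyRange_neg_one_snoc _ _ (by push_cast; omega),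
      show ((L:Int) + 1 - (m:Int) - 1 + 1) = ((L:Int) + 1 - (m:Int)) from by ring,
      List.foldl_append, ih']
    simp only [List.foldl_cons, List.foldl_nil]
    have hnat : ((L:Int) + 1 - (m:Int)).toNat = L + 1 - m := by omega
    rw [hnat, show (L + 2 - m) = (L + 1 - m) + 1 from by omega, List.replicate_succ']
    rw [List.append_assoc, List.set_append_right _ _ (by simp)]
    simp only [List.length_replicate, Nat.sub_self, List.singleton_append, List.set_cons_zero]
    simp only [Prod.mk.injEq]
    refine ⟨?_, by push_cast; ring⟩
    rw [show (L + 2 - (m+1)) = L + 1 - m from by omega, List.range_succ_eq_map]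
    simp only [List.map_cons, List.map_map]
    congr 1
    congr 1
    · push_cast; ring
    · exact List.map_congr_left (fun j _ => by simp only [Function.comp_apply, Nat.succ_eq_add_one]; push_cast; ring)

theorem s3_inv (square : List (List Int)) (l0 v0 : Int) (T B : List Int) : ∀ m, m ≤ square.length →
    (PySem.List.pyRange 1 (1 + (m:Int)) 1).foldl
      (fun (s : List (List Int) × Int) r => (pvSetCell s.1 r.toNat 0 (s.2 + 1), s.2 + 1))
      (T :: (ringLast square l0 ++ [B]), v0)
    = (T :: (tgtInner (square.take m) (v0 + 1) l0 ++ (ringLast (square.drop m) (l0 - (m:Int)) ++ [B])), v0 + m) := by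
  intro m
  induction m with
  | zero =>
    intro _
    rw [show ((1:Int) + ((0:Nat):Int)) = 1 from by norm_num]
    simp [PySem.List.pyRange_one, tgtInner]
  | succ m ih =>
    intro hm
    have ih' := ih (by omega)
    rw [show ((1:Int) + ((m+1:Nat):Int)) = (1 + (m:Int)) + 1 from by push_cast; ring,
      PySem.List.pyRange_one_succ_right (by omega),
      List.foldl_append, ih']
    simp only [List.foldl_cons, List.foldl_nil]
    have hlt : m < square.length := by omega
    have hdrop : square.drop m = square[m] :: square.drop (m+1) := (List.getElem_cons_drop hlt).symm
    have hnat : ((1:Int) + (m:Int)).toNat = m + 1 := by omega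
    rw [hnat, hdrop]
    simp only [ringLast]
    simp only [List.cons_append]
    unfold pvSetCell
    rw [getD_mid' _ _ _ _ _ m (by simp [length_tgtInner]; omega),
        List.set_cons_zero,
        set_mid' _ _ _ _ _ m (by simp [length_tgtInner]; omega)]
    have hsnoc : tgtInner (square.take m) (v0 + 1) l0 ++ [(v0 + (m:Int) + 1) :: (square[m] ++ [l0 - (m:Int)])]
        = tgtInner (square.take (m+1)) (v0 + 1) l0 := by
      rw [show square.take (m+1) = square.take m ++ [square[m]] from by
            rw [List.take_succ]; simp [List.getElem?_eq_getElem hlt],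
          tgtInner_snoc, List.length_take, Nat.min_eq_left (Nat.le_of_lt hlt)]
      push_cast
      ring_nf
    rw [List.append_cons, ← List.append_assoc, hsnoc]
    rw [show (l0 - ((m+1:Nat):Int)) = l0 - (m:Int) - 1 from by push_cast; ring,
        show (v0 + ((m+1:Nat):Int)) = v0 + (m:Int) + 1 from by push_cast; ring]
    simp

theorem fold_last (l : List Int) (pre : List (List Int)) (j : Nat) (h : pre.length = j) : ∀ (row : List Int) (v : Int),
    l.foldl (fun (s : List (List Int) × Int) c => (pvSetCell s.1 j c.toNat (s.2 + 1), s.2 + 1)) (pre ++ [row], v)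
    = (pre ++ [(l.foldl (fun (s : List Int × Int) c => (s.1.set c.toNat (s.2 + 1), s.2 + 1)) (row, v)).1],
       (l.foldl (fun (s : List Int × Int) c => (s.1.set c.toNat (s.2 + 1), s.2 + 1)) (row, v)).2) := by
  subst h
  induction l with
  | nil => intro row v; simp
  | cons c cs ih =>
    intro row v
    simp only [List.foldl_cons, pvSetCell]
    rw [getD_at_len, set_at_len]
    exact ih (row.set c.toNat (v + 1)) (v + 1)

theorem row_asc (L : Nat) (v0 : Int) : ∀ m, m ≤ L + 1 →
    (PySem.List.pyRange 1 (1 + (m:Int)) 1).foldl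
      (fun (s : List Int × Int) c => (s.1.set c.toNat (s.2 + 1), s.2 + 1)) (v0 :: List.replicate (L + 1) (0:Int), v0)
    = ((List.range (m + 1)).map (fun (j : Nat) => v0 + (j:Int)) ++ List.replicate (L + 1 - m) (0:Int), v0 + m) := by
  intro m
  induction m with
  | zero =>
    intro _
    rw [show ((1:Int) + ((0:Nat):Int)) = 1 from by norm_num]
    simp [PySem.List.pyRange_one]
  | succ m ih =>
    intro hm
    have ih' := ih (by omega)
    rw [show ((1:Int) + ((m+1:Nat):Int)) = (1 + (m:Int)) + 1 from by push_cast; ring,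
      PySem.List.pyRange_one_succ_right (by omega),
      List.foldl_append, ih']
    simp only [List.foldl_cons, List.foldl_nil]
    have hnat : ((1:Int) + (m:Int)).toNat = m + 1 := by omega
    rw [hnat, show (L + 1 - m) = (L - m) + 1 from by omega, List.replicate_succ]
    rw [List.set_append_right _ _ (by simp), show (L + 1 - (m + 1)) = L - m from by omega]
    simp only [List.length_map, List.length_range, Nat.sub_self, List.set_cons_zero]
    simp only [Prod.mk.injEq]
    refine ⟨?_, by push_cast; ring⟩
    have hmap : (List.range (m+1+1)).map (fun (j:Nat) => v0 + (j:Int))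
        = (List.range (m+1)).map (fun (j:Nat) => v0 + (j:Int)) ++ [v0 + (m:Int) + 1] := by
      rw [List.range_succ, List.map_append]
      simp only [List.map_cons, List.map_nil]
      congr 2
      push_cast; ring
    rw [hmap]
    simp

theorem set_at_len' {α : Type} (xs ys : List α) (a b : α) (j : Nat) (h : xs.length = j) :
    (xs ++ a :: ys).set j b = xs ++ b :: ys := by subst h; exact set_at_len xs ys a b
theorem pvSetCell_mid (x a : List Int) (xs ys : List (List Int)) (c : Nat) (v : Int) (j : Nat) (h : xs.length = j) :
    pvSetCell (x :: (xs ++ a :: ys)) (j + 1) c v = x :: (xs ++ (a.set c v) :: ys) := by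
  unfold pvSetCell
  rw [getD_mid' _ _ _ _ _ j h, set_mid' _ _ _ _ _ j h]
theorem pvSetCell_at_len (pre : List (List Int)) (row : List Int) (c : Nat) (v : Int) (j : Nat) (h : pre.length = j) :
    pvSetCell (pre ++ [row]) j c v = pre ++ [row.set c v] := by
  subst h
  unfold pvSetCell
  rw [getD_at_len, set_at_len]
theorem map_range_succ_snoc (f : Nat → Int) (m : Nat) :
    (List.range (m + 1)).map f = (List.range m).map f ++ [f m] := by
  rw [List.range_succ, List.map_append]; rfl
theorem set_replicate_zero (k : Nat) (v : Int) :
    (List.replicate (k + 1) (0 : Int)).set 0 v = v :: List.replicate k (0 : Int) := by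
  rw [List.replicate_succ, List.set_cons_zero]

theorem B_eq_tgt (square : List (List Int)) :
    add_2_to_diameter_of_spiral_square_alt square = tgt square := by
  simp only [add_2_to_diameter_of_spiral_square_alt]
  -- phase 1: right column
  have h1 := s1_inv square ((square.length : Int) * (square.length : Int)) square.length (le_refl _)
  rw [show ((square.length : Int) - ((square.length : Nat) : Int)) = 0 from by push_cast; ring] at h1
  simp only [Nat.sub_self, List.take_zero, List.map_nil, List.nil_append, List.drop_zero] at h1
  rw [h1]
  -- phase 2: top row
  rw [fold_head]
  have h2 := row_desc square.length ((square.length : Int) * (square.length : Int) + (square.length : Int)) (square.length + 2) (le_refl _)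
  rw [show ((square.length : Int) + 1 - ((square.length + 2 : Nat) : Int)) = -1 from by push_cast; ring] at h2
  simp only [Nat.sub_self, List.replicate_zero, List.nil_append] at h2
  rw [h2]
  simp only []
  -- phase 3: left column, then the bottom-left corner
  rw [show ((square.length : Int) + 2) = (1 + (square.length : Int)) + 1 from by ring,
    PySem.List.pyRange_one_succ_right (by omega), List.foldl_append]
  rw [List.foldl_append]
  have h3 := s3_inv square ((square.length : Int) * (square.length : Int) + (square.length : Int))
      ((square.length : Int) * (square.length : Int) + (square.length : Int) + ((square.length + 2 : Nat) : Int))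
      ((List.range (square.length + 2)).map (fun (j : Nat) => (square.length : Int) * (square.length : Int) + (square.length : Int) + ((square.length + 2 : Nat) : Int) - (j : Int)))
      (List.replicate (square.length + 2) (0 : Int)) square.length (le_refl _)
  rw [show ((1 : Int) + ((square.length : Nat) : Int)) = 1 + (square.length : Int) from by push_cast; ring] at h3
  simp only [List.take_length, List.drop_length, ringLast, List.nil_append] at h3
  rw [h3]
  simp only [List.foldl_cons, List.foldl_nil]
  rw [show ((1 : Int) + (square.length : Int)).toNat = square.length + 1 from by omega]
  rw [pvSetCell_mid _ _ _ _ _ _ square.length (by simp [length_tgtInner]),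
      show (square.length + 2) = (square.length + 1) + 1 from rfl,
      set_replicate_zero]
  rw [← List.cons_append]
  rw [fold_last _ _ (square.length + 1) (by simp [length_tgtInner])]
  have h4 := row_asc square.length
      ((square.length:Int) * (square.length:Int) + (square.length:Int) + ((square.length + 1 + 1 : Nat) : Int) + (square.length:Int) + 1)
      square.length (by omega)
  rw [h4]
  simp only []
  rw [show (square.length + 1 - square.length) = 1 from by omega, List.replicate_one]
  rw [pvSetCell_at_len _ _ _ _ (square.length + 1) (by simp [length_tgtInner])]
  rw [set_at_len' _ _ _ _ (square.length + 1) (by simp)]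
  rw [show ((square.length:Int) * (square.length:Int) + (square.length:Int) + ((square.length + 1 + 1 : Nat) : Int) + 1)
      = ((square.length:Int) * (square.length:Int) + 2 * (square.length:Int) + 3) from by push_cast; ring]
  have ht : List.map (fun (j : Nat) => (square.length:Int) * (square.length:Int) + (square.length:Int) + ((square.length + 1 + 1 : Nat) : Int) - (j:Int)) (List.range (square.length + 1 + 1))
      = tgtTop square.length ((square.length:Int) * (square.length:Int)) := by
    rw [tgtTop]
    exact List.map_congr_left (fun j _ => by push_cast; ring)
  have hb : List.map (fun (j : Nat) => (square.length:Int) * (square.length:Int) + (square.length:Int) + ((square.length + 1 + 1 : Nat) : Int) + (square.length:Int) + 1 + (j:Int)) (List.range (square.length + 1))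
        ++ [(square.length:Int) * (square.length:Int) + (square.length:Int) + ((square.length + 1 + 1 : Nat) : Int) + (square.length:Int) + 1 + (square.length:Int) + 1]
      = tgtBot square.length ((square.length:Int) * (square.length:Int)) := by
    rw [tgtBot, show (square.length + 2) = (square.length + 1) + 1 from rfl,
        map_range_succ_snoc _ (square.length + 1)]
    congr 1
    · exact List.map_congr_left (fun j _ => by push_cast; ring)
    · congr 1
      push_cast; ring
  rw [ht, hb]
  simp [tgt]

theorem A_eq_tgt (square : List (List Int)) :
    add_2_to_diameter_of_spiral_square square = tgt square := by
  simp only [add_2_to_diameter_of_spiral_square]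
  rw [show PySem.List.pyRange ((square.length:Int)^2 + (square.length:Int) + (square.length:Int) + 2) ((square.length:Int)^2 + (square.length:Int)) (-1)
      = (List.range (square.length + 2)).map (fun k : Nat => (square.length:Int)^2 + (square.length:Int) + (square.length:Int) + 2 - (k:Int))
    from by rw [← countdown_map]; congr 1; push_cast; ring]
  rw [show (PySem.List.pyRange (((square.length:Int) + 2) ^ 2) (((square.length:Int) + 2) ^ 2 - (square.length:Int) - 2) (-1)).reverse
      = (List.range (square.length + 2)).map (fun k : Nat => (square.length:Int)^2 + 3*(square.length:Int) + 3 + (k:Int))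
    from by
      rw [PySem.List.pyRange_neg_one_eq_reverse, List.reverse_reverse, PySem.List.pyRange_one]
      rw [show ((((square.length:Int) + 2) ^ 2 + 1) - ((((square.length:Int) + 2) ^ 2 - (square.length:Int) - 2) + 1)) = ((square.length:Int)+2) from by ring]
      rw [show (((square.length:Int)+2)).toNat = square.length + 2 from by omega]
      exact List.map_congr_left (fun k _ => by push_cast; ring)]
  rw [getD0_map_range, getD_last_map_range, getD0_map_range]
  rw [show PySem.List.pyRange ((square.length:Int)^2 + (square.length:Int) + (square.length:Int) + 2 - ((0:Nat):Int) + 1) ((square.length:Int)^2 + 3*(square.length:Int) + 3 + ((0:Nat):Int)) 1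
      = PySem.List.pyRange ((square.length:Int)^2 + 2*(square.length:Int) + 3) (((square.length:Int)^2 + 2*(square.length:Int) + 3) + (square.length:Int)) 1
    from by congr 1 <;> push_cast <;> ring]
  rw [show PySem.List.pyRange ((square.length:Int)^2 + (square.length:Int) + (square.length:Int) + 2 - ((square.length + 1 : Nat):Int) - 1) ((square.length:Int)^2 + (square.length:Int) + (square.length:Int) + 2 - ((square.length + 1 : Nat):Int) - (square.length:Int) - 1) (-1)
      = PySem.List.pyRange ((square.length:Int)^2 + (square.length:Int)) (((square.length:Int)^2 + (square.length:Int)) - (square.length:Int)) (-1)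
    from by congr 1 <;> push_cast <;> ring]
  rw [foldl_snoc_map, zip_ranges_map]
  have htop : List.map (fun (k : Nat) => (square.length:Int) ^ 2 + (square.length:Int) + (square.length:Int) + 2 - (k:Int)) (List.range (square.length + 2))
      = tgtTop square.length ((square.length:Int) * (square.length:Int)) := by
    simp only [tgtTop]; exact List.map_congr_left (fun k _ => by push_cast; ring)
  have hbot : List.map (fun (k : Nat) => (square.length:Int) ^ 2 + 3 * (square.length:Int) + 3 + (k:Int)) (List.range (square.length + 2))
      = tgtBot square.length ((square.length:Int) * (square.length:Int)) := by
    simp only [tgtBot]; exact List.map_congr_left (fun k _ => by push_cast; ring)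
  rw [htop, hbot,
    show ((square.length:Int) ^ 2 + 2 * (square.length:Int) + 3) = ((square.length:Int) * (square.length:Int) + 2 * (square.length:Int) + 3) from by ring,
    show ((square.length:Int) ^ 2 + (square.length:Int)) = ((square.length:Int) * (square.length:Int) + (square.length:Int)) from by ring]
  simp [tgt]

-- ===== VERDICT (by name: the statement is the Claim_ definition above) =====
theorem add_2_to_diameter_of_spiral_square_spec : Claim_equal_add_2_to_diameter_of_spiral_square := by
  intro square _
  unfold Spec_add_2_to_diameter_of_spiral_square
  rw [A_eq_tgt, B_eq_tgt]
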